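-- pv_equiv track=rewrite | github.com/DHRUV6029/Google-Msft_InterviewQues | Google/min_cost_to_disconnect_a_tree.py | min_disconnect_cost
-- ===== SOURCE A (Python) =====
-- def min_disconnect_cost(u, parent_weight, tree):
--     """
--     Computes the minimal total cost to disconnect all leaf nodes in the subtree rooted at node u.
--
--     Parameters:
--     - u: current node
--     - parent_weight: weight of the edge connecting u to its parent
--     - tree: dictionary representing the tree
--
--     Returns:
--     - Minimum total weight required to disconnect all leaf nodes in the subtree rooted at u
--     """
--     if u not in tree or len(tree[u]) == 0:
--         # Leaf node: return the weight of the edge to its parent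
--         return parent_weight
--     else:
--         # Option 1: Cut the edge to the parent
--         cost_cut_edge = parent_weight
--
--         # Option 2: Do not cut the edge to the parent, sum over children
--         cost_no_cut = 0
--         for v, weight_uv in tree[u]:
--             cost_no_cut += min_disconnect_cost(v, weight_uv, tree)
--
--         # Return the minimum of the two options
--         return min(cost_cut_edge, cost_no_cut)
-- ===== SOURCE B (Python) =====
-- def min_disconnect_cost(u, parent_weight, tree):
--     # Iterative post-order: explicit task stack (call/combine frames) + value stack,
--     # same recurrence as the recursive version but without recursion.
--     tasks = [("call", u, parent_weight)]
--     vals = []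
--     while tasks:
--         t = tasks.pop()
--         if t[0] == "call":
--             _, node, pw = t
--             children = tree.get(node)
--             if not children:
--                 vals.append(pw)
--             else:
--                 tasks.append(("comb", pw, len(children)))
--                 for v, w in reversed(children):
--                     tasks.append(("call", v, w))
--         else:
--             _, pw, k = t
--             s = 0
--             for _ in range(k):
--                 s += vals.pop()
--             vals.append(min(pw, s))
--     return vals[-1]
-- ===== Notes on version B (the rewrite author's own statement) =====
-- stated objective: alternative
-- what changed: Replaces the recursive top-down DFS by an iterative post-order traversal driven by an explicit stack of call/combine frames and a value stack; the same recurrence min(parent_weight, sum of children) is evaluated bottom-up without recursion.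
import Mathlib
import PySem

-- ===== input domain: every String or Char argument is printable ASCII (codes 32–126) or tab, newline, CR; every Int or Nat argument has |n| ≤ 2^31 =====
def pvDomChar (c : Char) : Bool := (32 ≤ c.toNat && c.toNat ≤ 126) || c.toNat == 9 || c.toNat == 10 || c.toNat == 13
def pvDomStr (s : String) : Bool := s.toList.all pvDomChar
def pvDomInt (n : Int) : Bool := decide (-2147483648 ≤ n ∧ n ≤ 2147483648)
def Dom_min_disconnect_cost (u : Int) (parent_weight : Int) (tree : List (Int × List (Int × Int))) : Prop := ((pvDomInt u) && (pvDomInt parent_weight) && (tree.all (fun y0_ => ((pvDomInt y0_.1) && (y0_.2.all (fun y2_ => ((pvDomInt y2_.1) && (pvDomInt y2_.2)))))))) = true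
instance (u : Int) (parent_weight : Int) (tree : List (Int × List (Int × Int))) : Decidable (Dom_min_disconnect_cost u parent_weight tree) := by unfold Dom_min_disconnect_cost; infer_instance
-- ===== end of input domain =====

-- B replaces A's recursive top-down DFS by an iterative post-order traversal with an explicit
-- stack of call/combine frames and a value stack (same recurrence and cost, no recursion).
-- Both Pythons terminate exactly on inputs whose start node reaches no cycle, so both ports carry
-- a fuel guard that Pre_ proves sufficient; fuel only totalizes the definitions, it is not part of
-- either algorithm.

-- ===== PORT A =====
def pvGoA (tree : List (Int × List (Int × Int))) : Nat → Int → Int → Int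
  | 0, _, parent_weight => parent_weight
  | fuel+1, u, parent_weight =>
    match (PySem.Dict.mk tree).get? u with
    | none => parent_weight                     -- u not in tree
    | some [] => parent_weight                  -- len(tree[u]) == 0
    | some (c :: cs) =>
        min parent_weight ((c :: cs).foldl (fun acc vw => acc + pvGoA tree fuel vw.1 vw.2) 0)

def min_disconnect_cost (u : Int) (parent_weight : Int) (tree : List (Int × List (Int × Int))) : Int :=
  pvGoA tree (tree.length + 1) u parent_weight

-- ===== PORT B =====
inductive PvTask where
  | call : Int → Int → PvTask
  | comb : Int → Nat → PvTask
deriving DecidableEq, Repr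

-- fuel bound for B's while loop (a step count of the run on acyclic input; fuel guard only, not Python code)
def pvCostB (tree : List (Int × List (Int × Int))) : Nat → Int → Nat
  | 0, _ => 1
  | fuel+1, u =>
    match (PySem.Dict.mk tree).get? u with
    | none => 1
    | some [] => 1
    | some (c :: cs) => 2 + (c :: cs).foldl (fun acc vw => acc + pvCostB tree fuel vw.1) 0

-- the while loop: head of the task list = top of Python's `tasks` stack, head of vals = top of `vals`
def pvRun (tree : List (Int × List (Int × Int))) : Nat → List PvTask → List Int → Int
  | 0, _, vals => vals.headD 0
  | _+1, [], vals => vals.headD 0              -- loop done: return vals[-1]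
  | fuel+1, PvTask.call node pw :: ts, vals =>
    match (PySem.Dict.mk tree).get? node with
    | none => pvRun tree fuel ts (pw :: vals)
    | some [] => pvRun tree fuel ts (pw :: vals)
    | some (c :: cs) =>
        pvRun tree fuel ((c :: cs).map (fun vw => PvTask.call vw.1 vw.2) ++ PvTask.comb pw (c :: cs).length :: ts) vals
  | fuel+1, PvTask.comb pw k :: ts, vals =>
    pvRun tree fuel ts (min pw ((vals.take k).foldl (· + ·) 0) :: vals.drop k)

def min_disconnect_cost_alt (u : Int) (parent_weight : Int) (tree : List (Int × List (Int × Int))) : Int :=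
  pvRun tree (pvCostB tree (tree.length + 1) u + 1) [PvTask.call u parent_weight] []

-- ===== PRECONDITION & SPEC =====
-- `pvSafe tree n v`: the descendant relation below v is well-founded within depth n, i.e. every
-- path of child edges starting at v reaches a leaf after < n steps (standard bounded-descent
-- acyclicity marker for the finite edge relation "entry of a → its children").
def pvSafe (tree : List (Int × List (Int × Int))) : Nat → Int → Bool
  | 0, _ => false
  | n+1, v =>
    match (PySem.Dict.mk tree).get? v with
    | none => true
    | some [] => true
    | some (c :: cs) => (c :: cs).all (fun vw => pvSafe tree n vw.1)

-- Pre_ = the start node reaches no cycle (any cycle-free path of child edges visits distinct keys,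
-- hence has length ≤ tree.length). Exactly there both Pythons terminate: on a reachable cycle A
-- overflows the recursion stack (RecursionError) and B's while loop diverges.
def Pre_min_disconnect_cost (u : Int) (parent_weight : Int) (tree : List (Int × List (Int × Int))) : Prop :=
  pvSafe tree (tree.length + 1) u = true

instance (u : Int) (parent_weight : Int) (tree : List (Int × List (Int × Int))) : Decidable (Pre_min_disconnect_cost u parent_weight tree) := by
  unfold Pre_min_disconnect_cost; infer_instance

def pvWitness_min_disconnect_cost : Int × Int × (List (Int × List (Int × Int))) :=
  (1, 5, [(1, [(2, 3), (3, 4)]), (2, [(3, 1)]), (3, [])])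

def Spec_min_disconnect_cost (u : Int) (parent_weight : Int) (tree : List (Int × List (Int × Int))) (out : Int) : Prop := out = min_disconnect_cost_alt u parent_weight tree
instance (u : Int) (parent_weight : Int) (tree : List (Int × List (Int × Int))) (out : Int) : Decidable (Spec_min_disconnect_cost u parent_weight tree out) := by unfold Spec_min_disconnect_cost; infer_instance

-- ===== CLAIM (what is proved, stated in full; the proofs are below) =====
def Claim_equal_min_disconnect_cost : Prop := ∀ (u : Int) (parent_weight : Int) (tree : List (Int × List (Int × Int))), Dom_min_disconnect_cost u parent_weight tree → Pre_min_disconnect_cost u parent_weight tree → Spec_min_disconnect_cost u parent_weight tree (min_disconnect_cost u parent_weight tree)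

-- ===== LEMMAS AND PROOFS =====

-- children of a safe internal node are safe one level down
lemma pv_safe_children {tree : List (Int × List (Int × Int))} {n : Nat} {u : Int}
    {c : Int × Int} {cs : List (Int × Int)}
    (hs : pvSafe tree (n + 1) u = true)
    (hget : (PySem.Dict.mk tree).get? u = some (c :: cs)) :
    ∀ vw ∈ (c :: cs), pvSafe tree n vw.1 = true := by
  simp only [pvSafe, hget, List.all_eq_true] at hs
  exact fun vw hvw => hs vw hvw

-- any two fuels at least the safe depth give A's recursion the same value
lemma pvGoA_stable {tree : List (Int × List (Int × Int))} :
    ∀ (m : Nat) (u : Int), pvSafe tree m u = true →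
      ∀ (f f' : Nat) (pw : Int), m ≤ f → m ≤ f' → pvGoA tree f u pw = pvGoA tree f' u pw := by
  intro m
  induction m with
  | zero => intro u hs; simp [pvSafe] at hs
  | succ n ih =>
    intro u hs f f' pw hf hf'
    match f, hf, f', hf' with
    | f1+1, _, f2+1, _ =>
      rcases hget : (PySem.Dict.mk tree).get? u with _ | ⟨_ | ⟨c, cs⟩⟩
      · simp only [pvGoA, hget]
      · simp only [pvGoA, hget]
      · have hch := pv_safe_children hs hget
        have hcong : ∀ vw ∈ (c :: cs), ∀ (acc : Int),
            acc + pvGoA tree f1 vw.1 vw.2 = acc + pvGoA tree f2 vw.1 vw.2 := by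
          intro vw hvw acc
          exact congrArg (acc + ·)
            (ih vw.1 (hch vw hvw) f1 f2 vw.2 (by omega) (by omega))
        simp only [pvGoA, hget]
        exact congrArg (min pw) (PySem.List.foldl_congr_mem' _ _ _ _ hcong)

-- same stability for the step-count bound
lemma pvCostB_stable {tree : List (Int × List (Int × Int))} :
    ∀ (m : Nat) (u : Int), pvSafe tree m u = true →
      ∀ (f f' : Nat), m ≤ f → m ≤ f' → pvCostB tree f u = pvCostB tree f' u := by
  intro m
  induction m with
  | zero => intro u hs; simp [pvSafe] at hs
  | succ n ih =>
    intro u hs f f' hf hf'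
    match f, hf, f', hf' with
    | f1+1, _, f2+1, _ =>
      rcases hget : (PySem.Dict.mk tree).get? u with _ | ⟨_ | ⟨c, cs⟩⟩
      · simp only [pvCostB, hget]
      · simp only [pvCostB, hget]
      · have hch := pv_safe_children hs hget
        have hcong : ∀ vw ∈ (c :: cs), ∀ (acc : Nat),
            acc + pvCostB tree f1 vw.1 = acc + pvCostB tree f2 vw.1 := by
          intro vw hvw acc
          exact congrArg (acc + ·) (ih vw.1 (hch vw hvw) f1 f2 (by omega) (by omega))
        simp only [pvCostB, hget]
        exact congrArg (2 + ·) (PySem.List.foldl_congr_mem' _ _ _ _ hcong)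

-- simulation: one recursive call of A = one call frame of B's machine
lemma pv_sim {tree : List (Int × List (Int × Int))} :
    ∀ (n : Nat), n ≤ tree.length + 1 → ∀ (u : Int), pvSafe tree n u = true →
      ∀ (pw : Int) (ts : List PvTask) (vals : List Int) (f : Nat),
        pvRun tree (pvCostB tree (tree.length + 1) u + f) (PvTask.call u pw :: ts) vals
          = pvRun tree f ts (pvGoA tree (tree.length + 1) u pw :: vals) := by
  intro n
  induction n with
  | zero => intro _ u hs; simp [pvSafe] at hs
  | succ n ih =>
    intro hn u hs pw ts vals f
    rcases hget : (PySem.Dict.mk tree).get? u with _ | ⟨_ | ⟨c, cs⟩⟩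
    · have hcost : pvCostB tree (tree.length + 1) u = 1 := by simp only [pvCostB, hget]
      rw [hcost, show 1 + f = f + 1 by omega]
      simp only [pvRun, pvGoA, hget]
    · have hcost : pvCostB tree (tree.length + 1) u = 1 := by simp only [pvCostB, hget]
      rw [hcost, show 1 + f = f + 1 by omega]
      simp only [pvRun, pvGoA, hget]
    · have hch := pv_safe_children hs hget
      have hc0 : pvCostB tree (tree.length + 1) u
          = 2 + (c :: cs).foldl (fun acc vw => acc + pvCostB tree tree.length vw.1) 0 := by
        simp only [pvCostB, hget]
      have hcost : pvCostB tree (tree.length + 1) u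
          = 2 + ((c :: cs).map (fun vw => pvCostB tree (tree.length + 1) vw.1)).sum := by
        rw [hc0, PySem.List.foldl_congr_mem' (c :: cs) _
              (fun acc vw => acc + pvCostB tree (tree.length + 1) vw.1) 0
              (fun vw hvw acc => by
                exact congrArg (acc + ·)
                  (pvCostB_stable n vw.1 (hch vw hvw) _ _ (by omega) (by omega))),
            PySem.List.foldl_add_nat, Nat.zero_add]
      have hg0 : pvGoA tree (tree.length + 1) u pw
          = min pw ((c :: cs).foldl (fun acc vw => acc + pvGoA tree tree.length vw.1 vw.2) 0) := by
        simp only [pvGoA, hget]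
      have hgoA : pvGoA tree (tree.length + 1) u pw
          = min pw (((c :: cs).map (fun vw => pvGoA tree (tree.length + 1) vw.1 vw.2)).sum) := by
        rw [hg0, PySem.List.foldl_congr_mem' (c :: cs) _
              (fun acc vw => acc + pvGoA tree (tree.length + 1) vw.1 vw.2) 0
              (fun vw hvw acc => by
                exact congrArg (acc + ·)
                  (pvGoA_stable n vw.1 (hch vw hvw) _ _ vw.2 (by omega) (by omega))),
            PySem.List.foldl_add, zero_add]
      -- running a block of call frames pushes the corresponding values (in reverse)
      have inner : ∀ (ds : List (Int × Int)), (∀ vw ∈ ds, pvSafe tree n vw.1 = true) →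
          ∀ (ts : List PvTask) (vals : List Int) (f : Nat),
            pvRun tree ((ds.map (fun vw => pvCostB tree (tree.length + 1) vw.1)).sum + f)
                (ds.map (fun vw => PvTask.call vw.1 vw.2) ++ ts) vals
              = pvRun tree f ts ((ds.map (fun vw => pvGoA tree (tree.length + 1) vw.1 vw.2)).reverse ++ vals) := by
        intro ds
        induction ds with
        | nil => intro _ ts vals f; simp
        | cons d ds' ihd =>
          intro hds ts vals f
          have h1 : ((d :: ds').map (fun vw => pvCostB tree (tree.length + 1) vw.1)).sum + f
              = pvCostB tree (tree.length + 1) d.1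
                + ((ds'.map (fun vw => pvCostB tree (tree.length + 1) vw.1)).sum + f) := by
            simp [List.map_cons, List.sum_cons]; omega
          rw [h1]
          simp only [List.map_cons, List.cons_append]
          rw [ih (by omega) d.1 (hds d (by simp)) d.2
                (ds'.map (fun vw => PvTask.call vw.1 vw.2) ++ ts) vals
                ((ds'.map (fun vw => pvCostB tree (tree.length + 1) vw.1)).sum + f)]
          rw [ihd (fun vw hvw => hds vw (by simp [hvw])) ts
                (pvGoA tree (tree.length + 1) d.1 d.2 :: vals) f]
          simp [List.append_assoc]
      -- step 1: pop the call frame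
      rw [hcost, show (2 + ((c :: cs).map (fun vw => pvCostB tree (tree.length + 1) vw.1)).sum) + f
            = (((c :: cs).map (fun vw => pvCostB tree (tree.length + 1) vw.1)).sum + (1 + f)) + 1 by omega]
      simp only [pvRun, hget]
      -- the block of child calls
      rw [inner (c :: cs) hch (PvTask.comb pw (c :: cs).length :: ts) vals (1 + f)]
      -- step 2: the combine frame
      rw [show 1 + f = f + 1 by omega]
      simp only [pvRun]
      have hlen : ((c :: cs).map (fun vw => pvGoA tree (tree.length + 1) vw.1 vw.2)).reverse.length
          = (c :: cs).length := by simp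
      rw [← hlen, List.take_left, List.drop_left, hgoA]
      rw [show ((c :: cs).map (fun vw => pvGoA tree (tree.length + 1) vw.1 vw.2)).reverse.foldl (· + ·) 0
            = ((c :: cs).map (fun vw => pvGoA tree (tree.length + 1) vw.1 vw.2)).sum from by
          rw [← List.sum_eq_foldl]; exact List.sum_reverse_int _]

-- ===== VERDICT (by name: the statement is the Claim_ definition above) =====
theorem min_disconnect_cost_spec : Claim_equal_min_disconnect_cost := by
  intro u pw tree _ hPre
  unfold Spec_min_disconnect_cost min_disconnect_cost min_disconnect_cost_alt
  have h := pv_sim (tree.length + 1) (by omega) u hPre pw [] [] 1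
  rw [h]
  rfl
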